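-- pv_equiv track=rewrite | github.com/azure-2k4/metagenome_quantification | scripts/build_abruijn.py | get_consensus_path
-- ===== SOURCE A (Python) =====
-- from collections import defaultdict, Counter
--
-- def get_consensus_path(edges, nodes):
--     # Simple greedy walk for consensus (not optimal for complex graphs)
--     in_deg = Counter()
--     out_deg = Counter()
--     for src, dsts in edges.items():
--         out_deg[src] += len(dsts)
--         for dst in dsts:
--             in_deg[dst] += 1
--     start_nodes = [n for n in nodes if in_deg[n] == 0]
--     if not start_nodes:
--         start_nodes = list(nodes)
--     path = []
--     stack = [start_nodes[0]]
--     local_edges = {k: v.copy() for k, v in edges.items()}  # avoid mutating original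
--     while stack:
--         node = stack[-1]
--         if node in local_edges and local_edges[node]:
--             nxt = local_edges[node].pop()
--             stack.append(nxt)
--         else:
--             path.append(stack.pop())
--     return path[::-1]
-- ===== SOURCE B (Python) =====
-- from collections import Counter
--
-- def get_consensus_path(edges, nodes):
--     # Recursive edge-consuming walk: emit each node in postorder once its
--     # remaining edges are exhausted; the reversed postorder is the path.
--     in_deg = Counter(d for ds in edges.values() for d in ds)
--     start = next((n for n in nodes if in_deg[n] == 0), None)
--     if start is None:
--         start = nodes[0]
--     local = {k: list(v) for k, v in edges.items()}
--     post = []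
--     def visit(node):
--         while local.get(node):
--             visit(local[node].pop())
--         post.append(node)
--     visit(start)
--     return post[::-1]
-- ===== Notes on version B (the rewrite author's own statement) =====
-- stated objective: simpler
-- what changed: B replaces A's explicit stack loop (top-of-stack inspection, push/pop, append-then-reverse bookkeeping interleaved in one while) with a short recursive postorder helper visit(node) that exhausts a node's remaining edges by recursing on each popped destination and emits the node afterwards; it builds in_deg as one C-speed Counter over the flattened destination lists (dropping the unused out_deg Counter) and picks the start node with next() instead of materialising a filtered list, which is where the measured constant-factor speedup comes from.
import Mathlib
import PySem

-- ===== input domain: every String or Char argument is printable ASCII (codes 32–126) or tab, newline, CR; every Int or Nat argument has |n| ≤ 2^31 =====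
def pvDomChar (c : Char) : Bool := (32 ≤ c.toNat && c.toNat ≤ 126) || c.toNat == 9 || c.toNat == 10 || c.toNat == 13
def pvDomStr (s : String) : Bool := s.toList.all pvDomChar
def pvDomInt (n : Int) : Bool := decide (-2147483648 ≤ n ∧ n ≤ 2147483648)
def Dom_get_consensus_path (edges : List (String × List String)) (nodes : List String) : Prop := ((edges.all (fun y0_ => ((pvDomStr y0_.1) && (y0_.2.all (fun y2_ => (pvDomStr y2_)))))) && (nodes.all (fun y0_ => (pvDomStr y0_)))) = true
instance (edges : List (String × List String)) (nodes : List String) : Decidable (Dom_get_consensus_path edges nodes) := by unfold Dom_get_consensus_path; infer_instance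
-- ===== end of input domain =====

-- B replaces A's explicit stack loop with a recursive postorder walk (and a one-pass
-- Counter over the flattened destinations); same greedy edge-consuming walk, simpler code.


-- ===== PORT A =====
-- termination measure of the greedy walk: total remaining edges, summed over the DISTINCT keys
def pvWA (le : PySem.Dict String (List String)) : Nat :=
  ((PySem.Set.ofList le.keys).map (fun k => (le.getD k []).length)).sum

-- sum over a nodup key list strictly drops when exactly one key's weight drops
theorem pvSum_lt {S : List String} (f g : String → Nat) (node : String)
    (hS : S.Nodup) (hn : node ∈ S) (hlt : g node < f node)
    (heq : ∀ k ∈ S, k ≠ node → g k = f k) :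
    (S.map g).sum < (S.map f).sum := by
  induction S with
  | nil => cases hn
  | cons a t ih =>
    simp only [List.map_cons, List.sum_cons]
    rcases List.mem_cons.mp hn with h | h
    · subst h
      have ht : ∀ k ∈ t, g k ≤ f k := by
        intro k hk
        rcases eq_or_ne k node with rfl | hne
        · exact absurd hk (List.nodup_cons.mp hS).1
        · exact le_of_eq (heq k (List.mem_cons_of_mem _ hk) hne)
      have : (t.map g).sum ≤ (t.map f).sum := List.sum_le_sum ht
      omega
    · have hane : a ≠ node := by
        rintro rfl; exact (List.nodup_cons.mp hS).1 h
      have := ih (List.nodup_cons.mp hS).2 h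
        (fun k hk hne => heq k (List.mem_cons_of_mem _ hk) hne)
      have ha : g a = f a := heq a (List.mem_cons_self) hane
      omega

theorem pvWA_lt (le : PySem.Dict String (List String)) (node : String)
    (h1 : le.contains node = true) (h2 : le.getD node [] ≠ []) :
    pvWA (le.insert node (le.getD node []).dropLast) < pvWA le := by
  unfold pvWA
  rw [PySem.Dict.keys_insert_of_contains le _ h1]
  apply pvSum_lt _ _ node (PySem.Set.nodup_ofList _)
  · exact (PySem.Set.mem_ofList _ _).mpr (((PySem.Dict.contains_iff_mem_keys le node).mp h1))
  · rw [PySem.Dict.getD_insert_self]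
    have h0 : (le.getD node []).length ≠ 0 := by
      simpa [List.length_eq_zero_iff] using h2
    have := List.length_dropLast (xs := le.getD node [])
    omega
  · intro k _ hne
    rw [PySem.Dict.getD_insert_of_ne _ _ _ hne]

def pvWalkA (le : PySem.Dict String (List String)) (stack path : List String) : List String :=
  match stack with
  | [] => path
  | node :: rest =>
    if h : le.contains node = true ∧ le.getD node [] ≠ [] then
      pvWalkA (le.insert node (le.getD node []).dropLast)
        ((le.getD node []).getLast h.2 :: node :: rest) path
    else
      pvWalkA le rest (path ++ [node])
termination_by 2 * pvWA le + stack.length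
decreasing_by
  · have := pvWA_lt le node h.1 h.2
    simp only [List.length_cons]
    omega
  · simp only [List.length_cons]
    omega

def get_consensus_path (edges : List (String × List String)) (nodes : List String) : List String :=
  -- in_deg/out_deg Counters built in one pass over edges.items()
  let degs := edges.foldl (fun (p : PySem.Dict String Int × PySem.Dict String Int) kv =>
      (p.1.modify kv.1 0 (· + (kv.2.length : Int)),
       kv.2.foldl (fun d dst => d.modify dst 0 (· + 1)) p.2))
      (PySem.Dict.empty, PySem.Dict.empty)
  let in_deg := degs.2
  let start_nodes := nodes.filter (fun n => in_deg.getD n 0 == 0)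
  let start_nodes' := if start_nodes.isEmpty then nodes else start_nodes
  -- local_edges = {k: v.copy() for k, v in edges.items()}
  let local_edges := edges.foldl (fun d kv => d.insert kv.1 kv.2) PySem.Dict.empty
  match start_nodes' with
  | [] => []   -- start_nodes[0] raises IndexError here (nodes = []); excluded by Pre_
  | s :: _ => (pvWalkA local_edges [s] []).reverse

-- ===== PORT B =====
-- visit(node): while local.get(node): visit(local[node].pop()); post.append(node).
-- Ported state-passing (the Python mutates closure state); the subtype carries the
-- 'the walk never adds edges' fact needed only for termination of the nested call.
def pvVisit (le : PySem.Dict String (List String)) (node : String) (post : List String) :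
    {p : PySem.Dict String (List String) × List String // pvWA p.1 ≤ pvWA le} :=
  if h : le.contains node = true ∧ le.getD node [] ≠ [] then
    -- one while-iteration: nxt = local[node].pop(); visit(nxt); then re-test the loop
    let r1 := pvVisit (le.insert node (le.getD node []).dropLast)
                ((le.getD node []).getLast h.2) post
    let r2 := pvVisit r1.1.1 node r1.1.2
    ⟨r2.1, le_trans r2.2 (le_trans r1.2 (le_of_lt (pvWA_lt le node h.1 h.2)))⟩
  else
    ⟨(le, post ++ [node]), le_refl _⟩
termination_by pvWA le
decreasing_by
  · exact pvWA_lt le node h.1 h.2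
  · exact lt_of_le_of_lt r1.2 (pvWA_lt le node h.1 h.2)

def get_consensus_path_alt (edges : List (String × List String)) (nodes : List String) : List String :=
  -- in_deg = Counter(d for ds in edges.values() for d in ds)
  let in_deg := PySem.Dict.counter (edges.flatMap (fun kv => kv.2))
  let start? := nodes.find? (fun n => in_deg.getD n 0 == 0)
  match (match start? with | some s => some s | none => nodes.head?) with
  | none => []   -- nodes[0] raises IndexError here (nodes = []); excluded by Pre_
  | some s =>
    -- local = {k: list(v) for k, v in edges.items()}
    let loc := edges.foldl (fun d kv => d.insert kv.1 kv.2) PySem.Dict.empty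
    ((pvVisit loc s []).1.2).reverse

-- ===== PRECONDITION & SPEC =====
-- nodes ≠ [] excludes exactly the inputs where the Python raises IndexError
-- (start_nodes[0] / nodes[0] on an empty list); nothing else is excluded.
def Pre_get_consensus_path (edges : List (String × List String)) (nodes : List String) : Prop :=
  nodes ≠ []
instance (edges : List (String × List String)) (nodes : List String) : Decidable (Pre_get_consensus_path edges nodes) := by unfold Pre_get_consensus_path; infer_instance

def pvWitness_get_consensus_path : (List (String × List String)) × List String :=
  ([("a", ["b", "c"]), ("b", ["c"])], ["a", "b", "c"])

def Spec_get_consensus_path (edges : List (String × List String)) (nodes : List String) (out : List String) : Prop := out = get_consensus_path_alt edges nodes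
instance (edges : List (String × List String)) (nodes : List String) (out : List String) : Decidable (Spec_get_consensus_path edges nodes out) := by unfold Spec_get_consensus_path; infer_instance

-- ===== CLAIM =====
def Claim_equal_get_consensus_path : Prop := ∀ (edges : List (String × List String)) (nodes : List String), Dom_get_consensus_path edges nodes → Pre_get_consensus_path edges nodes → Spec_get_consensus_path edges nodes (get_consensus_path edges nodes)

-- ===== LEMMAS AND PROOFS =====

theorem get_consensus_path_witness :
    Dom_get_consensus_path pvWitness_get_consensus_path.1 pvWitness_get_consensus_path.2 ∧
    Pre_get_consensus_path pvWitness_get_consensus_path.1 pvWitness_get_consensus_path.2 := by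
  constructor <;> decide

-- the in_deg getD value is the count in the flattened destination lists
theorem pvInDeg_getD (l : List (String × List String)) (d : PySem.Dict String Int) (v : String) :
    (l.foldl (fun d kv => kv.2.foldl (fun d x => d.modify x 0 (· + 1)) d) d).getD v 0
      = d.getD v 0 + ((l.flatMap (fun kv => kv.2)).count v : Int) := by
  induction l generalizing d with
  | nil => simp
  | cons a t ih =>
    simp only [List.foldl_cons, List.flatMap_cons, List.count_append]
    rw [ih, PySem.Dict.getD_foldl_modify_add_one]
    push_cast
    ring

-- the stack loop is the recursive postorder walk: running A's loop with node on top of the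
-- stack first performs exactly visit(node), then continues with the rest of the stack
theorem pvWalk_eq (le : PySem.Dict String (List String)) (node : String) (post : List String) :
    ∀ rest, pvWalkA le (node :: rest) post
      = pvWalkA (pvVisit le node post).1.1 rest (pvVisit le node post).1.2 := by
  induction le, node, post using pvVisit.induct with
  | case1 le node post h _r1 ih1 _ih2 _ih3 ih4 =>
    intro rest
    rw [pvWalkA, dif_pos h, ih1 (node :: rest), ih4 rest]
    conv_rhs => rw [pvVisit, dif_pos h]
  | case2 le node post h =>
    intro rest
    rw [pvWalkA, dif_neg h, pvVisit, dif_neg h]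

-- project away the unused out_deg component of A's pair fold
theorem pvDegs_snd (edges : List (String × List String)) :
    (edges.foldl (fun (p : PySem.Dict String Int × PySem.Dict String Int) kv =>
      (p.1.modify kv.1 0 (· + (kv.2.length : Int)),
       kv.2.foldl (fun d dst => d.modify dst 0 (· + 1)) p.2))
      (PySem.Dict.empty, PySem.Dict.empty)).2
    = edges.foldl (fun d kv => kv.2.foldl (fun d dst => d.modify dst 0 (· + 1)) d)
        PySem.Dict.empty := by
  suffices h : ∀ (l : List (String × List String))
      (p : PySem.Dict String Int × PySem.Dict String Int),
      (l.foldl (fun p kv =>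
        (p.1.modify kv.1 0 (· + (kv.2.length : Int)),
         kv.2.foldl (fun d dst => d.modify dst 0 (· + 1)) p.2)) p).2
      = l.foldl (fun d kv => kv.2.foldl (fun d dst => d.modify dst 0 (· + 1)) d) p.2 by
    exact h edges (PySem.Dict.empty, PySem.Dict.empty)
  intro l
  induction l with
  | nil => intro p; rfl
  | cons a t ih => intro p; simp only [List.foldl_cons]; exact ih _

-- ===== VERDICT (by name: the statement is the Claim_ definition above) =====
theorem get_consensus_path_spec : Claim_equal_get_consensus_path := by
  intro edges nodes _hdom hnodes
  simp only [Spec_get_consensus_path, get_consensus_path, get_consensus_path_alt]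
  rw [pvDegs_snd]
  -- the two in_deg dicts agree pointwise, so the two start predicates are the same function
  have hdeg : ∀ n : String,
      ((edges.foldl (fun d kv => kv.2.foldl (fun d dst => d.modify dst 0 (· + 1)) d)
          (PySem.Dict.empty : PySem.Dict String Int)).getD n 0 == 0)
        = ((PySem.Dict.counter (edges.flatMap (fun kv => kv.2))).getD n 0 == 0) := by
    intro n
    have h := pvInDeg_getD edges PySem.Dict.empty n
    rw [h, PySem.Dict.getD_counter]
    simp
  -- collapsing A's stack loop to B's recursive walk
  have hwalk : ∀ s, pvWalkA (edges.foldl (fun d kv => d.insert kv.1 kv.2) PySem.Dict.empty) [s] []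
      = (pvVisit (edges.foldl (fun d kv => d.insert kv.1 kv.2) PySem.Dict.empty) s []).1.2 := by
    intro s
    rw [pvWalk_eq _ s [] [], pvWalkA]
  -- align the start-node selection
  have hfind : nodes.find? (fun n => (PySem.Dict.counter (edges.flatMap (fun kv => kv.2))).getD n 0 == 0)
      = (nodes.filter (fun n =>
          (edges.foldl (fun d kv => kv.2.foldl (fun d dst => d.modify dst 0 (· + 1)) d)
            (PySem.Dict.empty : PySem.Dict String Int)).getD n 0 == 0)).head? := by
    rw [List.head?_filter]
    congr 1
    funext n
    exact (hdeg n).symm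
  rw [hfind]
  cases hflt : nodes.filter (fun n =>
      (edges.foldl (fun d kv => kv.2.foldl (fun d dst => d.modify dst 0 (· + 1)) d)
        (PySem.Dict.empty : PySem.Dict String Int)).getD n 0 == 0) with
  | nil =>
    cases nodes with
    | nil => exact absurd rfl hnodes
    | cons n0 t =>
      simp only [List.isEmpty_nil, if_true, List.head?_nil, List.head?_cons]
      rw [hwalk n0]
  | cons s t =>
    simp only [List.isEmpty_cons, Bool.false_eq_true, if_false, List.head?_cons]
    rw [hwalk s]
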